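-- pv_equiv track=rewrite | github.com/wfishell/Imperfect_Information_Automata_Learning | src/consistency_checker.py | update_prefs
-- ===== SOURCE A (Python) =====
-- def update_prefs(prefs: list, updates: dict) -> list:
--     """Apply LLM re-query results to the preference list."""
--     updated = []
--     update_set = set(updates.keys())
--     reverse_set = {(j, i) for i, j in update_set}
--
--     for p in prefs:
--         key = (p["i"], p["j"])
--         if key in update_set:
--             new_pref = updates[key]
--             if new_pref not in (1, -1, 0):
--                 new_pref = 0
--             updated.append({**p, "pref": new_pref})
--         elif key in reverse_set:
--             # Update the reverse entry too
--             fwd = (p["j"], p["i"])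
--             new_pref = -updates[fwd]
--             updated.append({**p, "pref": new_pref})
--         else:
--             updated.append(p)
--     return updated
-- ===== SOURCE B (Python) =====
-- def update_prefs(prefs: list, updates: dict) -> list:
--     """Apply LLM re-query results (update-driven: index positions by key, patch per update)."""
--     index = {}
--     for pos, p in enumerate(prefs):
--         key = (p["i"], p["j"])
--         index[key] = index.get(key, []) + [pos]
--     out = list(prefs)
--     direct = set()
--     for (i, j), v in updates.items():
--         for pos in index.get((i, j), []):
--             out[pos] = {**prefs[pos], "pref": v if v in (1, -1, 0) else 0}
--             direct.add(pos)
--     for (i, j), v in updates.items():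
--         for pos in index.get((j, i), []):
--             if pos not in direct:
--                 out[pos] = {**prefs[pos], "pref": -v}
--     return out
-- ===== Notes on version B (the rewrite author's own statement) =====
-- stated objective: alternative
-- what changed: B inverts the traversal: instead of scanning prefs and testing each entry against two key sets, it builds a position index of prefs keyed by (i,j), copies prefs, and then iterates over the updates, patching the indexed positions in two staged passes (direct updates first, marking their positions, then reverse updates on unmarked positions).
import Mathlib
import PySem

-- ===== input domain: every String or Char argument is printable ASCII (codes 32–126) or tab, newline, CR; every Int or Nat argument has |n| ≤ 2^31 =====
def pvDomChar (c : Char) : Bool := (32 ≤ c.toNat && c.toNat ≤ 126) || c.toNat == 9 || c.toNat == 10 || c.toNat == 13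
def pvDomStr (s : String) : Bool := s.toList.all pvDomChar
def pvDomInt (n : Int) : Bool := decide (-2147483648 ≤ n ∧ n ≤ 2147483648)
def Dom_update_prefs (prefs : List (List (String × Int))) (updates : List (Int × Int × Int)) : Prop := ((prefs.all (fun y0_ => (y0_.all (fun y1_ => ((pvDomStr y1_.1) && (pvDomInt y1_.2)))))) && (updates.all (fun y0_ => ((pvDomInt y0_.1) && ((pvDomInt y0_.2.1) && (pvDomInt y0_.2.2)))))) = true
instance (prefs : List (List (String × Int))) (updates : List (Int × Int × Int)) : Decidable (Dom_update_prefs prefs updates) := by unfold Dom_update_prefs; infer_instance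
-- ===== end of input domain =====

-- B is update-driven instead of pref-driven: it indexes pref positions by key once, then patches the
-- affected positions per update in two staged passes (direct, then reverse) — alternative algorithm, same cost.

-- key(p) = (p["i"], p["j"]) — both Pythons read the two keys this way; Pre_ guarantees they are present.
def pvKey (p : List (String × Int)) : Int × Int :=
  let pd : PySem.Dict String Int := PySem.Dict.mk p
  (pd.getD "i" 0, pd.getD "j" 0)

-- ===== PORT A =====
-- `updates` is the Python dict keyed by the pair (i, j): element (i, j, v) stands for updates[(i,j)] = v.
-- p["i"], p["j"] would raise KeyError on an entry missing those keys; Pre_update_prefs excludes that,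
-- so Dict.getD with an (unreachable) default is exact. updates[key] / updates[fwd] are looked up only
-- when the key is known to be present, so getD is exact there too.
def update_prefs (prefs : List (List (String × Int))) (updates : List (Int × Int × Int)) : List (List (String × Int)) :=
  let ud : PySem.Dict (Int × Int) Int := PySem.Dict.mk (updates.map (fun u => ((u.1, u.2.1), u.2.2)))
  let updateSet : PySem.Set (Int × Int) := PySem.Set.ofList ud.keys
  let reverseSet : PySem.Set (Int × Int) := PySem.Set.ofList (updateSet.map (fun k => (k.2, k.1)))
  prefs.foldl (fun updated p =>
    let key := pvKey p
    if key ∈ updateSet then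
      let np := ud.getD key 0
      let np := if ¬(np = 1 ∨ np = -1 ∨ np = 0) then 0 else np
      updated ++ [((PySem.Dict.mk p).insert "pref" np).items]
    else if key ∈ reverseSet then
      let fwd : Int × Int := (key.2, key.1)
      let np := -(ud.getD fwd 0)
      updated ++ [((PySem.Dict.mk p).insert "pref" np).items]
    else
      updated ++ [p]) []

-- ===== PORT B =====
-- out[pos] = … is Python list assignment at a position produced by enumerate, always in range, so the
-- total pySetD / pyGetD forms are exact here.
def update_prefs_alt (prefs : List (List (String × Int))) (updates : List (Int × Int × Int)) : List (List (String × Int)) :=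
  let index : PySem.Dict (Int × Int) (List Int) :=
    (PySem.List.enumerate prefs).foldl (fun d q => d.modify (pvKey q.2) [] (· ++ [q.1])) PySem.Dict.empty
  let s1 : List (List (String × Int)) × PySem.Set Int :=
    updates.foldl (fun s u =>
      (index.getD (u.1, u.2.1) []).foldl (fun s pos =>
        (PySem.List.pySetD s.1 pos
           (((PySem.Dict.mk (PySem.List.pyGetD prefs pos [])).insert "pref"
               (if u.2.2 = 1 ∨ u.2.2 = -1 ∨ u.2.2 = 0 then u.2.2 else 0)).items),
         PySem.Set.add s.2 pos)) s) (prefs, PySem.Set.empty)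
  updates.foldl (fun o u =>
    (index.getD (u.2.1, u.1) []).foldl (fun o pos =>
      if pos ∈ s1.2 then o
      else PySem.List.pySetD o pos
        (((PySem.Dict.mk (PySem.List.pyGetD prefs pos [])).insert "pref" (-u.2.2)).items)) o) s1.1

-- ===== PRECONDITION & SPEC =====
-- Pre_ excludes (a) prefs entries without an "i" or "j" key, on which Python A raises KeyError, and
-- (b) association lists for `updates` with duplicate (i,j) keys, which do not represent a Python dict
-- (a dict literal collapses them, last value winning).
def Pre_update_prefs (prefs : List (List (String × Int))) (updates : List (Int × Int × Int)) : Prop :=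
  (∀ p ∈ prefs, "i" ∈ p.map Prod.fst ∧ "j" ∈ p.map Prod.fst) ∧
  (updates.map (fun u => (u.1, u.2.1))).Nodup
instance (prefs : List (List (String × Int))) (updates : List (Int × Int × Int)) : Decidable (Pre_update_prefs prefs updates) := by unfold Pre_update_prefs; infer_instance
def pvWitness_update_prefs : (List (List (String × Int))) × (List (Int × Int × Int)) :=
  ([[("i", 0), ("j", 1), ("pref", 1)], [("i", 1), ("j", 2), ("pref", -1)]], [(0, 1, -1), (2, 1, 7)])
def Spec_update_prefs (prefs : List (List (String × Int))) (updates : List (Int × Int × Int)) (out : List (List (String × Int))) : Prop := out = update_prefs_alt prefs updates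
instance (prefs : List (List (String × Int))) (updates : List (Int × Int × Int)) (out : List (List (String × Int))) : Decidable (Spec_update_prefs prefs updates out) := by unfold Spec_update_prefs; infer_instance

-- ===== CLAIM (what is proved, stated in full; the proofs are below) =====
def Claim_equal_update_prefs : Prop := ∀ (prefs : List (List (String × Int))) (updates : List (Int × Int × Int)), Dom_update_prefs prefs updates → Pre_update_prefs prefs updates → Spec_update_prefs prefs updates (update_prefs prefs updates)

-- ===== LEMMAS AND PROOFS =====

def pvNorm (v : Int) : Int := if v = 1 ∨ v = -1 ∨ v = 0 then v else 0

def pvPatch (p : List (String × Int)) (v : Int) : List (String × Int) :=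
  ((PySem.Dict.mk p).insert "pref" v).items

def pvFind (updates : List (Int × Int × Int)) (k : Int × Int) : Option (Int × Int × Int) :=
  updates.find? (fun u => ((u.1, u.2.1) : Int × Int) == k)

-- the common per-element contract of both programs
def pvCanon (updates : List (Int × Int × Int)) (p : List (String × Int)) : List (String × Int) :=
  match pvFind updates (pvKey p) with
  | some u => pvPatch p (pvNorm u.2.2)
  | none =>
    match pvFind updates ((pvKey p).2, (pvKey p).1) with
    | some u => pvPatch p (-u.2.2)
    | none => p

def pvElemA (updates : List (Int × Int × Int)) (p : List (String × Int)) : List (String × Int) :=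
  let ud : PySem.Dict (Int × Int) Int := PySem.Dict.mk (updates.map (fun u => ((u.1, u.2.1), u.2.2)))
  let updateSet : PySem.Set (Int × Int) := PySem.Set.ofList ud.keys
  let reverseSet : PySem.Set (Int × Int) := PySem.Set.ofList (updateSet.map (fun k => (k.2, k.1)))
  let key := pvKey p
  if key ∈ updateSet then
    let np := ud.getD key 0
    let np := if ¬(np = 1 ∨ np = -1 ∨ np = 0) then 0 else np
    ((PySem.Dict.mk p).insert "pref" np).items
  else if key ∈ reverseSet then
    let fwd : Int × Int := (key.2, key.1)
    let np := -(ud.getD fwd 0)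
    ((PySem.Dict.mk p).insert "pref" np).items
  else p

theorem pv_A_eq_map (prefs : List (List (String × Int))) (updates : List (Int × Int × Int)) :
    update_prefs prefs updates = prefs.map (pvElemA updates) := by
  unfold update_prefs
  rw [PySem.List.foldl_congr_mem _ _ (fun updated p => updated ++ [pvElemA updates p]) _
        (by intro acc p _; dsimp only; unfold pvElemA; dsimp only; split_ifs <;> rfl),
      PySem.List.foldl_append_singleton_eq_map]
  rfl

theorem pv_elemA_canon (updates : List (Int × Int × Int)) (p : List (String × Int)) :
    pvElemA updates p = pvCanon updates p := by
  unfold pvElemA pvCanon pvFind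
  dsimp only
  set k : Int × Int := pvKey p with hk
  have hkeys : (PySem.Dict.mk (updates.map (fun u => ((u.1, u.2.1), u.2.2)))).keys
      = updates.map (fun u => (u.1, u.2.1)) := by
    simp [PySem.Dict.keys, List.map_map]
  have hget : (PySem.Dict.mk (updates.map (fun u => ((u.1, u.2.1), u.2.2)))).get? k
      = (updates.find? (fun u => ((u.1, u.2.1) : Int × Int) == k)).map (fun u => u.2.2) := by
    show (((updates.map (fun u => ((u.1, u.2.1), u.2.2))).find? (fun q => q.1 == k)).map (fun q => q.2)) = _
    rw [List.find?_map, Option.map_map]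
    rfl
  have hget' : (PySem.Dict.mk (updates.map (fun u => ((u.1, u.2.1), u.2.2)))).get? (k.2, k.1)
      = (updates.find? (fun u => ((u.1, u.2.1) : Int × Int) == (k.2, k.1))).map (fun u => u.2.2) := by
    show (((updates.map (fun u => ((u.1, u.2.1), u.2.2))).find? (fun q => q.1 == (k.2, k.1))).map (fun q => q.2)) = _
    rw [List.find?_map, Option.map_map]
    rfl
  cases hf : updates.find? (fun u => ((u.1, u.2.1) : Int × Int) == k) with
  | some u =>
    have hu : u ∈ updates := List.mem_of_find?_eq_some hf
    have hke : ((u.1, u.2.1) : Int × Int) = k := by have h := List.find?_some hf; exact eq_of_beq h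
    have hmem : k ∈ PySem.Set.ofList (PySem.Dict.mk (updates.map (fun u => ((u.1, u.2.1), u.2.2)))).keys := by
      rw [hkeys, PySem.Set.mem_ofList]
      exact List.mem_map.2 ⟨u, hu, hke⟩
    rw [if_pos hmem]
    have hgd : (PySem.Dict.mk (updates.map (fun u => ((u.1, u.2.1), u.2.2)))).getD k 0 = u.2.2 := by
      rw [PySem.Dict.getD_eq_get?_getD, hget, hf]; rfl
    rw [hgd]
    unfold pvPatch pvNorm
    by_cases hc : u.2.2 = 1 ∨ u.2.2 = -1 ∨ u.2.2 = 0
    · simp [hc]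
    · simp [hc]
  | none =>
    have hnmem : k ∉ PySem.Set.ofList (PySem.Dict.mk (updates.map (fun u => ((u.1, u.2.1), u.2.2)))).keys := by
      rw [hkeys, PySem.Set.mem_ofList]
      intro hmem
      obtain ⟨u, hu, hke⟩ := List.mem_map.1 hmem
      exact (List.find?_eq_none.1 hf u hu) (beq_iff_eq.2 hke)
    rw [if_neg hnmem]
    cases hg : updates.find? (fun u => ((u.1, u.2.1) : Int × Int) == (k.2, k.1)) with
    | some u =>
      have hu : u ∈ updates := List.mem_of_find?_eq_some hg
      have hke : ((u.1, u.2.1) : Int × Int) = (k.2, k.1) := by have h := List.find?_some hg; exact eq_of_beq h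
      have h1 : u.1 = k.2 := congrArg Prod.fst hke
      have h2 : u.2.1 = k.1 := congrArg Prod.snd hke
      have hmemR : k ∈ PySem.Set.ofList
          ((PySem.Set.ofList (PySem.Dict.mk (updates.map (fun u => ((u.1, u.2.1), u.2.2)))).keys).map
            (fun q => (q.2, q.1))) := by
        rw [PySem.Set.mem_ofList]
        refine List.mem_map.2 ⟨(u.1, u.2.1), ?_, ?_⟩
        · rw [hkeys, PySem.Set.mem_ofList]
          exact List.mem_map.2 ⟨u, hu, rfl⟩
        · show ((u.2.1, u.1) : Int × Int) = k
          rw [h1, h2]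
      rw [if_pos hmemR]
      have hgd : (PySem.Dict.mk (updates.map (fun u => ((u.1, u.2.1), u.2.2)))).getD (k.2, k.1) 0 = u.2.2 := by
        rw [PySem.Dict.getD_eq_get?_getD, hget', hg]; rfl
      rw [hgd]
      rfl
    | none =>
      have hnmemR : k ∉ PySem.Set.ofList
          ((PySem.Set.ofList (PySem.Dict.mk (updates.map (fun u => ((u.1, u.2.1), u.2.2)))).keys).map
            (fun q => (q.2, q.1))) := by
        rw [PySem.Set.mem_ofList]
        intro hmem
        obtain ⟨q, hq, hqe⟩ := List.mem_map.1 hmem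
        rw [hkeys, PySem.Set.mem_ofList] at hq
        obtain ⟨u, hu, hue⟩ := List.mem_map.1 hq
        apply (List.find?_eq_none.1 hg u hu)
        apply beq_iff_eq.2
        have e1 : u.1 = q.1 := congrArg Prod.fst hue
        have e2 : u.2.1 = q.2 := congrArg Prod.snd hue
        have f1 : q.2 = k.1 := congrArg Prod.fst hqe
        have f2 : q.1 = k.2 := congrArg Prod.snd hqe
        rw [e1, e2, f1, f2]
      rw [if_neg hnmemR]

-- ---- B-side helpers (mirror the lets of update_prefs_alt) ----

def pvIdx (prefs : List (List (String × Int))) : PySem.Dict (Int × Int) (List Int) :=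
  (PySem.List.enumerate prefs).foldl (fun d q => d.modify (pvKey q.2) [] (· ++ [q.1])) PySem.Dict.empty

def pvStep1 (prefs : List (List (String × Int)))
    (s : List (List (String × Int)) × PySem.Set Int) (u : Int × Int × Int) :
    List (List (String × Int)) × PySem.Set Int :=
  ((pvIdx prefs).getD (u.1, u.2.1) []).foldl (fun s pos =>
    (PySem.List.pySetD s.1 pos (pvPatch (PySem.List.pyGetD prefs pos []) (pvNorm u.2.2)),
     PySem.Set.add s.2 pos)) s

def pvStep2 (prefs : List (List (String × Int))) (D : PySem.Set Int)
    (o : List (List (String × Int))) (u : Int × Int × Int) : List (List (String × Int)) :=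
  ((pvIdx prefs).getD (u.2.1, u.1) []).foldl (fun o pos =>
    if pos ∈ D then o
    else PySem.List.pySetD o pos (pvPatch (PySem.List.pyGetD prefs pos []) (-u.2.2))) o

theorem pv_alt_eq (prefs : List (List (String × Int))) (updates : List (Int × Int × Int)) :
    update_prefs_alt prefs updates =
      updates.foldl
        (pvStep2 prefs ((updates.foldl (pvStep1 prefs) (prefs, PySem.Set.empty)).2))
        ((updates.foldl (pvStep1 prefs) (prefs, PySem.Set.empty)).1) := rfl

theorem pv_mem_enumerate {α : Type} (xs : List α) (s : Int) (x : Int × α) :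
    x ∈ PySem.List.enumerate xs s ↔ ∃ m : Nat, ∃ h : m < xs.length, x = (s + m, xs[m]) := by
  induction xs generalizing s with
  | nil => simp [PySem.List.enumerate]
  | cons a t ih =>
    rw [PySem.List.enumerate_cons]
    simp only [List.mem_cons, ih]
    constructor
    · rintro (rfl | ⟨m, h, rfl⟩)
      · exact ⟨0, by simp, by simp⟩
      · exact ⟨m + 1, by simpa using h, by simp; ring_nf⟩
    · rintro ⟨m, h, rfl⟩
      cases m with
      | zero => left; simp
      | succ m =>
        right
        exact ⟨m, by simpa using h, by simp; ring_nf⟩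

theorem pv_mem_idx (prefs : List (List (String × Int))) (k : Int × Int) (pos : Int) :
    pos ∈ (pvIdx prefs).getD k [] ↔
      ∃ m : Nat, ∃ h : m < prefs.length, pos = (m : Int) ∧ pvKey prefs[m] = k := by
  unfold pvIdx
  have hfold : ((PySem.List.enumerate prefs).foldl (fun d q => d.modify (pvKey q.2) [] (· ++ [q.1]))
        PySem.Dict.empty)
      = (((PySem.List.enumerate prefs).map (fun q => (pvKey q.2, q.1))).foldl
          (fun d p => d.modify p.1 [] (· ++ [p.2])) PySem.Dict.empty) := by
    rw [List.foldl_map]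
  rw [hfold, PySem.Dict.getD_foldl_modify_append, PySem.Dict.getD_empty, List.nil_append,
    List.filter_map, List.map_map]
  simp only [List.mem_map, List.mem_filter, Function.comp]
  constructor
  · rintro ⟨q, ⟨hq, hk⟩, rfl⟩
    obtain ⟨m, h, rfl⟩ := (pv_mem_enumerate prefs 0 q).1 hq
    exact ⟨m, h, by simp, by simpa using eq_of_beq hk⟩
  · rintro ⟨m, h, rfl, hk⟩
    exact ⟨((m : Int), prefs[m]), ⟨(pv_mem_enumerate prefs 0 _).2 ⟨m, h, by simp⟩,
      by simpa using beq_iff_eq.2 hk⟩, rfl⟩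

theorem pv_mem_idx' (prefs : List (List (String × Int))) (k : Int × Int) (pos : Int) :
    pos ∈ (pvIdx prefs).getD k [] ↔
      ∃ m : Nat, m < prefs.length ∧ pos = (m : Int) ∧ pvKey (prefs.getD m []) = k := by
  rw [pv_mem_idx]
  constructor
  · rintro ⟨m, h, rfl, hk⟩
    exact ⟨m, h, rfl, by rw [List.getD_eq_getElem prefs [] h]; exact hk⟩
  · rintro ⟨m, h, rfl, hk⟩
    exact ⟨m, h, rfl, by rw [← List.getD_eq_getElem prefs [] h]; exact hk⟩

-- pointwise semantics of one inner positions-loop of pass 1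
theorem pv_foldl_set1 {α : Type} (ps : List Int) (val : Int → α)
    (hps : ∀ pos ∈ ps, ∃ m : Nat, pos = (m : Int)) :
    ∀ (s : List α × PySem.Set Int),
      (ps.foldl (fun s pos => (PySem.List.pySetD s.1 pos (val pos), PySem.Set.add s.2 pos)) s).1.length
        = s.1.length ∧
      (∀ m : Nat, m < s.1.length →
        (ps.foldl (fun s pos => (PySem.List.pySetD s.1 pos (val pos), PySem.Set.add s.2 pos)) s).1[m]?
          = if (m : Int) ∈ ps then some (val (m : Int)) else s.1[m]?) ∧
      (∀ x : Int,
        x ∈ (ps.foldl (fun s pos => (PySem.List.pySetD s.1 pos (val pos), PySem.Set.add s.2 pos)) s).2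
          ↔ x ∈ s.2 ∨ x ∈ ps) := by
  induction ps with
  | nil => intro s; simp
  | cons pos rest ih =>
    intro s
    obtain ⟨m0, rfl⟩ := hps pos (List.mem_cons_self)
    have hps' : ∀ pos ∈ rest, ∃ m : Nat, pos = (m : Int) :=
      fun p hp => hps p (List.mem_cons_of_mem _ hp)
    have hset : PySem.List.pySetD s.1 (m0 : Int) (val (m0 : Int)) = s.1.set m0 (val (m0 : Int)) := by
      simp
    obtain ⟨ihl, ihg, ihm⟩ := ih hps' (PySem.List.pySetD s.1 (m0 : Int) (val (m0 : Int)), PySem.Set.add s.2 (m0 : Int))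
    rw [List.foldl_cons]
    refine ⟨by rw [ihl, hset]; simp, ?_, ?_⟩
    · intro m hm
      have hm' : m < (PySem.List.pySetD s.1 (m0 : Int) (val (m0 : Int))).length := by
        rw [hset]; simpa using hm
      rw [ihg m hm']
      by_cases hr : (m : Int) ∈ rest
      · simp [hr]
      · rw [if_neg hr]
        by_cases he : m = m0
        · subst he
          rw [if_pos (List.mem_cons_self), hset, List.getElem?_set_self]
          simp [hm]
        · have : ((m : Int)) ∉ ((m0 : Int) :: rest) := by
            simp [hr]
            omega
          rw [if_neg this, hset, List.getElem?_set_ne (by omega)]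
    · intro x
      rw [ihm x, PySem.Set.mem_add]
      simp [or_comm, or_left_comm]

-- pointwise semantics of one inner positions-loop of pass 2
theorem pv_foldl_set2 {α : Type} (ps : List Int) (val : Int → α) (D : PySem.Set Int)
    (hps : ∀ pos ∈ ps, ∃ m : Nat, pos = (m : Int)) :
    ∀ (o : List α),
      (ps.foldl (fun o pos => if pos ∈ D then o else PySem.List.pySetD o pos (val pos)) o).length
        = o.length ∧
      (∀ m : Nat, m < o.length →
        (ps.foldl (fun o pos => if pos ∈ D then o else PySem.List.pySetD o pos (val pos)) o)[m]?
          = if (m : Int) ∈ ps ∧ (m : Int) ∉ D then some (val (m : Int)) else o[m]?) := by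
  induction ps with
  | nil => intro o; simp
  | cons pos rest ih =>
    intro o
    obtain ⟨m0, rfl⟩ := hps pos (List.mem_cons_self)
    have hps' : ∀ pos ∈ rest, ∃ m : Nat, pos = (m : Int) :=
      fun p hp => hps p (List.mem_cons_of_mem _ hp)
    set o' := if ((m0 : Int)) ∈ D then o else PySem.List.pySetD o ((m0 : Int)) (val ((m0 : Int))) with ho'
    have hlen' : o'.length = o.length := by
      rw [ho']; split_ifs <;> simp
    obtain ⟨ihl, ihg⟩ := ih hps' o'
    rw [List.foldl_cons]
    refine ⟨by rw [ihl, hlen'], ?_⟩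
    intro m hm
    rw [ihg m (by rw [hlen']; exact hm)]
    by_cases hr : (m : Int) ∈ rest ∧ (m : Int) ∉ D
    · simp [hr.1, hr.2]
    · rw [if_neg hr]
      by_cases he : m = m0
      · subst he
        by_cases hd : ((m : Int)) ∈ D
        · rw [if_neg (by simp [hd]), ho', if_pos hd]
        · rw [if_pos ⟨List.mem_cons_self, hd⟩, ho', if_neg hd,
            PySem.List.pySetD_of_nonneg _ _ (by positivity)]
          rw [Int.toNat_natCast, List.getElem?_set_self]
          simp [hm]
      · have hno : ¬(((m : Int)) ∈ ((m0 : Int) :: rest) ∧ ((m : Int)) ∉ D) := by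
          intro hc
          rcases List.mem_cons.1 hc.1 with h | h
          · exact he (by exact_mod_cast h)
          · exact hr ⟨h, hc.2⟩
        rw [if_neg hno, ho']
        split_ifs with hd
        · rfl
        · rw [PySem.List.pySetD_of_nonneg _ _ (by positivity), Int.toNat_natCast,
            List.getElem?_set_ne (by omega)]

theorem pv_pass1 (prefs : List (List (String × Int))) (us : List (Int × Int × Int)) :
    ∀ (s : List (List (String × Int)) × PySem.Set Int), s.1.length = prefs.length →
      (us.map (fun u => ((u.1, u.2.1) : Int × Int))).Nodup →
      (us.foldl (pvStep1 prefs) s).1.length = prefs.length ∧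
      (∀ m : Nat, m < prefs.length →
        (us.foldl (pvStep1 prefs) s).1[m]? =
          match pvFind us (pvKey (prefs.getD m [])) with
          | some u => some (pvPatch (prefs.getD m []) (pvNorm u.2.2))
          | none => s.1[m]?) ∧
      (∀ x : Int, x ∈ (us.foldl (pvStep1 prefs) s).2 ↔
        x ∈ s.2 ∨ ∃ u ∈ us, ∃ m : Nat, m < prefs.length ∧ x = (m : Int) ∧
          pvKey (prefs.getD m []) = (u.1, u.2.1)) := by
  induction us with
  | nil => exact fun s hlen _ => ⟨hlen, fun m hm => rfl, by simp⟩
  | cons u rest ih =>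
    intro s hlen hnd
    rw [List.map_cons, List.nodup_cons] at hnd
    obtain ⟨hhd, hnd'⟩ := hnd
    rw [List.foldl_cons]
    have hps : ∀ pos ∈ (pvIdx prefs).getD (u.1, u.2.1) [], ∃ m : Nat, pos = (m : Int) := by
      intro pos hp
      obtain ⟨m, _, rfl, _⟩ := (pv_mem_idx' prefs _ pos).1 hp
      exact ⟨m, rfl⟩
    obtain ⟨hl1, hg1, hm1⟩ := pv_foldl_set1 ((pvIdx prefs).getD (u.1, u.2.1) [])
      (fun pos => pvPatch (PySem.List.pyGetD prefs pos []) (pvNorm u.2.2)) hps s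
    have hstep : pvStep1 prefs s u = ((pvIdx prefs).getD (u.1, u.2.1) []).foldl
        (fun s pos => (PySem.List.pySetD s.1 pos (pvPatch (PySem.List.pyGetD prefs pos []) (pvNorm u.2.2)),
          PySem.Set.add s.2 pos)) s := rfl
    have hlen' : (pvStep1 prefs s u).1.length = prefs.length := by rw [hstep, hl1, hlen]
    obtain ⟨ihl, ihg, ihm⟩ := ih (pvStep1 prefs s u) hlen' hnd'
    refine ⟨ihl, ?_, ?_⟩
    · intro m hm
      rw [ihg m hm]
      have hmem : ((m : Int)) ∈ (pvIdx prefs).getD (u.1, u.2.1) [] ↔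
          pvKey (prefs.getD m []) = (u.1, u.2.1) := by
        rw [pv_mem_idx']
        constructor
        · rintro ⟨m', _, hmm, hk⟩
          have : m = m' := by exact_mod_cast hmm
          subst this; exact hk
        · intro hk; exact ⟨m, hm, rfl, hk⟩
      cases hf : pvFind rest (pvKey (prefs.getD m [])) with
      | some u' =>
        have hu' : u' ∈ rest := List.mem_of_find?_eq_some hf
        have hku' : ((u'.1, u'.2.1) : Int × Int) = pvKey (prefs.getD m []) := by
          have h := List.find?_some hf; exact eq_of_beq h
        have hne : ((u.1, u.2.1) : Int × Int) ≠ pvKey (prefs.getD m []) := by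
          intro h
          exact hhd (List.mem_map.2 ⟨u', hu', by rw [hku', ← h]⟩)
        have hcons : pvFind (u :: rest) (pvKey (prefs.getD m [])) = some u' := by
          unfold pvFind at hf ⊢
          simp only [List.find?_cons, beq_eq_false_iff_ne.2 hne]
          exact hf
        rw [hcons]
      | none =>
        have hcons : pvFind (u :: rest) (pvKey (prefs.getD m [])) =
            if ((u.1, u.2.1) : Int × Int) = pvKey (prefs.getD m []) then some u else none := by
          unfold pvFind at hf ⊢
          by_cases h : ((u.1, u.2.1) : Int × Int) = pvKey (prefs.getD m [])
          · rw [if_pos h]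
            simp only [List.find?_cons, beq_iff_eq.2 h]
          · rw [if_neg h]
            simp only [List.find?_cons, beq_eq_false_iff_ne.2 h]
            exact hf
        rw [hcons]
        show (pvStep1 prefs s u).1[m]? = _
        rw [hstep, hg1 m (by rw [hlen]; exact hm)]
        by_cases hke : ((u.1, u.2.1) : Int × Int) = pvKey (prefs.getD m [])
        · rw [if_pos (hmem.2 hke.symm), if_pos hke, PySem.List.pyGetD_natCast]
        · rw [if_neg (fun hc => hke (hmem.1 hc).symm), if_neg hke]
    · intro x
      rw [ihm x, hstep, hm1 x]
      constructor
      · rintro ((hx | hx) | ⟨u', hu', hrest⟩)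
        · exact Or.inl hx
        · obtain ⟨m, hm, rfl, hk⟩ := (pv_mem_idx' prefs _ x).1 hx
          exact Or.inr ⟨u, List.mem_cons_self, m, hm, rfl, hk⟩
        · exact Or.inr ⟨u', List.mem_cons_of_mem _ hu', hrest⟩
      · rintro (hx | ⟨u', hu', m, hm, rfl, hk⟩)
        · exact Or.inl (Or.inl hx)
        · rcases List.mem_cons.1 hu' with rfl | hu'
          · exact Or.inl (Or.inr ((pv_mem_idx' prefs _ _).2 ⟨m, hm, rfl, hk⟩))
          · exact Or.inr ⟨u', hu', m, hm, rfl, hk⟩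

theorem pv_pass2 (prefs : List (List (String × Int))) (us : List (Int × Int × Int))
    (D : PySem.Set Int) :
    ∀ (o : List (List (String × Int))), o.length = prefs.length →
      (us.map (fun u => ((u.1, u.2.1) : Int × Int))).Nodup →
      (us.foldl (pvStep2 prefs D) o).length = prefs.length ∧
      (∀ m : Nat, m < prefs.length →
        (us.foldl (pvStep2 prefs D) o)[m]? =
          if (m : Int) ∈ D then o[m]?
          else
            match pvFind us ((pvKey (prefs.getD m [])).2, (pvKey (prefs.getD m [])).1) with
            | some u => some (pvPatch (prefs.getD m []) (-u.2.2))
            | none => o[m]?) := by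
  induction us with
  | nil =>
    refine fun o hlen _ => ⟨hlen, fun m hm => ?_⟩
    split_ifs <;> rfl
  | cons u rest ih =>
    intro o hlen hnd
    rw [List.map_cons, List.nodup_cons] at hnd
    obtain ⟨hhd, hnd'⟩ := hnd
    rw [List.foldl_cons]
    have hps : ∀ pos ∈ (pvIdx prefs).getD (u.2.1, u.1) [], ∃ m : Nat, pos = (m : Int) := by
      intro pos hp
      obtain ⟨m, _, rfl, _⟩ := (pv_mem_idx' prefs _ pos).1 hp
      exact ⟨m, rfl⟩
    obtain ⟨hl2, hg2⟩ := pv_foldl_set2 ((pvIdx prefs).getD (u.2.1, u.1) [])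
      (fun pos => pvPatch (PySem.List.pyGetD prefs pos []) (-u.2.2)) D hps o
    have hstep : pvStep2 prefs D o u = ((pvIdx prefs).getD (u.2.1, u.1) []).foldl
        (fun o pos => if pos ∈ D then o
          else PySem.List.pySetD o pos (pvPatch (PySem.List.pyGetD prefs pos []) (-u.2.2))) o := rfl
    have hlen' : (pvStep2 prefs D o u).length = prefs.length := by rw [hstep, hl2, hlen]
    obtain ⟨ihl, ihg⟩ := ih (pvStep2 prefs D o u) hlen' hnd'
    refine ⟨ihl, ?_⟩
    intro m hm
    rw [ihg m hm]
    have hmem : ((m : Int)) ∈ (pvIdx prefs).getD (u.2.1, u.1) [] ↔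
        pvKey (prefs.getD m []) = (u.2.1, u.1) := by
      rw [pv_mem_idx']
      constructor
      · rintro ⟨m', _, hmm, hk⟩
        have : m = m' := by exact_mod_cast hmm
        subst this; exact hk
      · intro hk; exact ⟨m, hm, rfl, hk⟩
    by_cases hd : ((m : Int)) ∈ D
    · simp only [if_pos hd]
      rw [hstep, hg2 m (by rw [hlen]; exact hm), if_neg (by simp [hd])]
    · simp only [if_neg hd]
      cases hf : pvFind rest ((pvKey (prefs.getD m [])).2, (pvKey (prefs.getD m [])).1) with
      | some u' =>
        have hu' : u' ∈ rest := List.mem_of_find?_eq_some hf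
        have hku' : ((u'.1, u'.2.1) : Int × Int)
            = ((pvKey (prefs.getD m [])).2, (pvKey (prefs.getD m [])).1) := by
          have h := List.find?_some hf; exact eq_of_beq h
        have hne : ((u.1, u.2.1) : Int × Int)
            ≠ ((pvKey (prefs.getD m [])).2, (pvKey (prefs.getD m [])).1) := by
          intro h
          exact hhd (List.mem_map.2 ⟨u', hu', by rw [hku', ← h]⟩)
        have hcons : pvFind (u :: rest) ((pvKey (prefs.getD m [])).2, (pvKey (prefs.getD m [])).1)
            = some u' := by
          unfold pvFind at hf ⊢
          simp only [List.find?_cons, beq_eq_false_iff_ne.2 hne]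
          exact hf
        rw [hcons]
      | none =>
        have hcons : pvFind (u :: rest) ((pvKey (prefs.getD m [])).2, (pvKey (prefs.getD m [])).1) =
            if ((u.1, u.2.1) : Int × Int) = ((pvKey (prefs.getD m [])).2, (pvKey (prefs.getD m [])).1)
            then some u else none := by
          unfold pvFind at hf ⊢
          by_cases h : ((u.1, u.2.1) : Int × Int)
              = ((pvKey (prefs.getD m [])).2, (pvKey (prefs.getD m [])).1)
          · rw [if_pos h]
            simp only [List.find?_cons, beq_iff_eq.2 h]
          · rw [if_neg h]
            simp only [List.find?_cons, beq_eq_false_iff_ne.2 h]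
            exact hf
        rw [hcons]
        show (pvStep2 prefs D o u)[m]? = _
        rw [hstep, hg2 m (by rw [hlen]; exact hm)]
        by_cases hke : ((u.1, u.2.1) : Int × Int)
            = ((pvKey (prefs.getD m [])).2, (pvKey (prefs.getD m [])).1)
        · have h1 : u.1 = (pvKey (prefs.getD m [])).2 := congrArg Prod.fst hke
          have h2 : u.2.1 = (pvKey (prefs.getD m [])).1 := congrArg Prod.snd hke
          have hkk : pvKey (prefs.getD m []) = (u.2.1, u.1) := Prod.ext_iff.2 ⟨h2.symm, h1.symm⟩
          rw [if_pos ⟨hmem.2 hkk, hd⟩, if_pos hke, PySem.List.pyGetD_natCast]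
        · have hno : ¬(((m : Int)) ∈ (pvIdx prefs).getD (u.2.1, u.1) [] ∧ ((m : Int)) ∉ D) := by
            rintro ⟨hc, -⟩
            have hkk := hmem.1 hc
            exact hke (by rw [hkk])
          rw [if_neg hno, if_neg hke]

theorem pvCanon_find_some (updates : List (Int × Int × Int)) (p : List (String × Int))
    (u : Int × Int × Int) (h : pvFind updates (pvKey p) = some u) :
    pvCanon updates p = pvPatch p (pvNorm u.2.2) := by
  unfold pvCanon; rw [h]

theorem pvCanon_find_rev (updates : List (Int × Int × Int)) (p : List (String × Int))
    (u : Int × Int × Int) (h1 : pvFind updates (pvKey p) = none)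
    (h2 : pvFind updates ((pvKey p).2, (pvKey p).1) = some u) :
    pvCanon updates p = pvPatch p (-u.2.2) := by
  unfold pvCanon; rw [h1, h2]

theorem pvCanon_find_none (updates : List (Int × Int × Int)) (p : List (String × Int))
    (h1 : pvFind updates (pvKey p) = none)
    (h2 : pvFind updates ((pvKey p).2, (pvKey p).1) = none) :
    pvCanon updates p = p := by
  unfold pvCanon; rw [h1, h2]

theorem pv_B_eq_map (prefs : List (List (String × Int))) (updates : List (Int × Int × Int))
    (hn : (updates.map (fun u => (u.1, u.2.1))).Nodup) :
    update_prefs_alt prefs updates = prefs.map (pvCanon updates) := by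
  rw [pv_alt_eq]
  obtain ⟨hl1, hg1, hm1⟩ := pv_pass1 prefs updates (prefs, PySem.Set.empty) rfl hn
  obtain ⟨hl2, hg2⟩ := pv_pass2 prefs updates
    ((updates.foldl (pvStep1 prefs) (prefs, PySem.Set.empty)).2)
    ((updates.foldl (pvStep1 prefs) (prefs, PySem.Set.empty)).1) hl1 hn
  apply List.ext_getElem?
  intro m
  by_cases hm : m < prefs.length
  · rw [hg2 m hm, List.getElem?_map, List.getElem?_eq_getElem hm,
      ← List.getD_eq_getElem prefs [] hm]
    have hD : ((m : Int)) ∈ (updates.foldl (pvStep1 prefs) (prefs, PySem.Set.empty)).2 ↔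
        (pvFind updates (pvKey (prefs.getD m []))).isSome := by
      rw [hm1]
      constructor
      · rintro (h | ⟨u, hu, m', hm', hmm, hk⟩)
        · simp at h
        · have : m = m' := by exact_mod_cast hmm
          subst this
          unfold pvFind
          exact List.find?_isSome.2 ⟨u, hu, beq_iff_eq.2 hk.symm⟩
      · intro h
        obtain ⟨u, hu, hpu⟩ := List.find?_isSome.1 h
        exact Or.inr ⟨u, hu, m, hm, rfl, (eq_of_beq hpu).symm⟩
    cases hfd : pvFind updates (pvKey (prefs.getD m [])) with
    | some u =>
      have hDm : ((m : Int)) ∈ (updates.foldl (pvStep1 prefs) (prefs, PySem.Set.empty)).2 :=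
        hD.2 (by rw [hfd]; rfl)
      rw [if_pos hDm, hg1 m hm, hfd]
      show some (pvPatch (prefs.getD m []) (pvNorm u.2.2)) = some (pvCanon updates (prefs.getD m []))
      rw [pvCanon_find_some updates (prefs.getD m []) u hfd]
    | none =>
      have hDm : ((m : Int)) ∉ (updates.foldl (pvStep1 prefs) (prefs, PySem.Set.empty)).2 := by
        intro hc
        have := hD.1 hc
        rw [hfd] at this
        simp at this
      rw [if_neg hDm]
      cases hfr : pvFind updates ((pvKey (prefs.getD m [])).2, (pvKey (prefs.getD m [])).1) with
      | some u =>
        show some (pvPatch (prefs.getD m []) (-u.2.2)) = some (pvCanon updates (prefs.getD m []))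
        rw [pvCanon_find_rev updates (prefs.getD m []) u hfd hfr]
      | none =>
        rw [hg1 m hm, hfd]
        show prefs[m]? = some (pvCanon updates (prefs.getD m []))
        rw [List.getElem?_eq_getElem hm, ← List.getD_eq_getElem prefs [] hm,
          pvCanon_find_none updates (prefs.getD m []) hfd hfr]
  · have h1 : (updates.foldl
        (pvStep2 prefs ((updates.foldl (pvStep1 prefs) (prefs, PySem.Set.empty)).2))
        ((updates.foldl (pvStep1 prefs) (prefs, PySem.Set.empty)).1))[m]? = none := by
      rw [List.getElem?_eq_none]
      rw [(pv_pass2 prefs updates _ _ hl1 hn).1]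
      omega
    have h2 : (prefs.map (pvCanon updates))[m]? = none := by
      rw [List.getElem?_eq_none]
      rw [List.length_map]
      omega
    rw [h1, h2]

-- ===== VERDICT (by name: the statement is the Claim_ definition above) =====
theorem update_prefs_spec : Claim_equal_update_prefs := by
  intro prefs updates _ hpre
  show update_prefs prefs updates = update_prefs_alt prefs updates
  rw [pv_A_eq_map, pv_B_eq_map prefs updates hpre.2]
  exact List.map_congr_left (fun p _ => pv_elemA_canon updates p)
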